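-- pv_equiv track=rewrite | github.com/Ethycs/layer_context_seg | layered-context-graph/src/synthesis/enhanced_tape_synthesizer.py | _generate_learning_objectives
-- ===== SOURCE A (Python) =====
-- from typing import Dict, List, Any, Optional
--
-- def _generate_learning_objectives(nodes: List[Dict]) -> List[str]:
--     """Generate learning objectives from nodes"""
--     objectives = []
--
--     # Analyze node types to create objectives
--     has_technical = any(n.get('segment_type') == 'technical_core' for n in nodes)
--     has_practical = any(n.get('segment_type') == 'application' for n in nodes)
--     has_examples = any(n.get('segment_type') == 'illustrative' for n in nodes)
--
--     if has_technical:
--         objectives.append("Understand the core technical concepts and their implementations")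
--     if has_practical:
--         objectives.append("Apply the concepts to real-world scenarios")
--     if has_examples:
--         objectives.append("Work through practical examples and exercises")
--
--     objectives.append("Build a comprehensive mental model of the subject matter")
--
--     return objectives
-- ===== SOURCE B (Python) =====
-- def _generate_learning_objectives(nodes):
--     """Generate learning objectives from nodes (table-driven single pass with early exit)."""
--     table = (
--         ('technical_core', "Understand the core technical concepts and their implementations"),
--         ('application', "Apply the concepts to real-world scenarios"),
--         ('illustrative', "Work through practical examples and exercises"),
--     )
--     seen = set()
--     for n in nodes:
--         seen.add(n.get('segment_type'))
--         if all(key in seen for key, _ in table):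
--             break
--     return [msg for key, msg in table if key in seen] \
--         + ["Build a comprehensive mental model of the subject matter"]
-- ===== Notes on version B (the rewrite author's own statement) =====
-- stated objective: alternative
-- what changed: Replaces A's three hard-coded any()-scans plus if/append chain by a table-driven design: one short-circuiting pass over the nodes accumulates the set of segment types seen (breaking early once every table key is present), and the output is built by filtering the (key, message) table against that set.
import Mathlib
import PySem

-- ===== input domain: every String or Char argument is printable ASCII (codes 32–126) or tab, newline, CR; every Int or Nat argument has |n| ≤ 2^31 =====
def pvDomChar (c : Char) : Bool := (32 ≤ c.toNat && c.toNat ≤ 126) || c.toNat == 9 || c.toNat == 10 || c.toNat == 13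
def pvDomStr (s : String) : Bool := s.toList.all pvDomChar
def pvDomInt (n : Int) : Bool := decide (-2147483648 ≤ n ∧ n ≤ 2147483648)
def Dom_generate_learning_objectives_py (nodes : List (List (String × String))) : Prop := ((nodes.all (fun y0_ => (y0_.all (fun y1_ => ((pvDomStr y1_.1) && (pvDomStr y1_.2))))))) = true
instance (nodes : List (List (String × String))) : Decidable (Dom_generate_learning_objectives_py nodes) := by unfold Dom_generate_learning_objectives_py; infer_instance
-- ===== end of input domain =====

-- B is table-driven: one short-circuiting pass collects the set of segment types seen (early exit
-- once all table keys are present), then the output is the table filtered against that set (alternative).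

-- ===== PORT A =====
def generate_learning_objectives_py (nodes : List (List (String × String))) : List String :=
  let objectives : List String := []
  let has_technical := nodes.any (fun n => PySem.Dict.get? (PySem.Dict.mk n) "segment_type" == some "technical_core")
  let has_practical := nodes.any (fun n => PySem.Dict.get? (PySem.Dict.mk n) "segment_type" == some "application")
  let has_examples := nodes.any (fun n => PySem.Dict.get? (PySem.Dict.mk n) "segment_type" == some "illustrative")
  let objectives := if has_technical then objectives ++ ["Understand the core technical concepts and their implementations"] else objectives
  let objectives := if has_practical then objectives ++ ["Apply the concepts to real-world scenarios"] else objectives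
  let objectives := if has_examples then objectives ++ ["Work through practical examples and exercises"] else objectives
  objectives ++ ["Build a comprehensive mental model of the subject matter"]

-- ===== PORT B =====
-- the (key, message) table of Source B
def pvTable : List (String × String) :=
  [("technical_core", "Understand the core technical concepts and their implementations"),
   ("application", "Apply the concepts to real-world scenarios"),
   ("illustrative", "Work through practical examples and exercises")]

-- the 'for n in nodes: seen.add(...); if all(...): break' loop of Source B
def pvCollect : List (List (String × String)) → PySem.Set (Option String) → PySem.Set (Option String)
  | [], seen => seen
  | n :: rest, seen =>
    let seen := PySem.Set.add seen (PySem.Dict.get? (PySem.Dict.mk n) "segment_type")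
    if pvTable.all (fun kv => PySem.Set.contains seen (some kv.1)) then seen
    else pvCollect rest seen

def generate_learning_objectives_py_alt (nodes : List (List (String × String))) : List String :=
  let seen := pvCollect nodes PySem.Set.empty
  (pvTable.filterMap (fun kv => if PySem.Set.contains seen (some kv.1) then some kv.2 else none))
    ++ ["Build a comprehensive mental model of the subject matter"]

-- ===== PRECONDITION & SPEC =====
def Spec_generate_learning_objectives_py (nodes : List (List (String × String))) (out : List String) : Prop := out = generate_learning_objectives_py_alt nodes
instance (nodes : List (List (String × String))) (out : List String) : Decidable (Spec_generate_learning_objectives_py nodes out) := by unfold Spec_generate_learning_objectives_py; infer_instance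

-- ===== CLAIM =====
def Claim_equal_generate_learning_objectives_py : Prop := ∀ (nodes : List (List (String × String))), Dom_generate_learning_objectives_py nodes → Spec_generate_learning_objectives_py nodes (generate_learning_objectives_py nodes)

-- ===== LEMMAS AND PROOFS =====

-- membership of a table key in the collected set equals A's any()-scan for that key
theorem contains_pvCollect (nodes : List (List (String × String)))
    (seen : PySem.Set (Option String)) (k : String) (hk : k ∈ pvTable.map Prod.fst) :
    PySem.Set.contains (pvCollect nodes seen) (some k)
      = (PySem.Set.contains seen (some k)
         || nodes.any (fun n => PySem.Dict.get? (PySem.Dict.mk n) "segment_type" == some k)) := by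
  induction nodes generalizing seen with
  | nil => simp [pvCollect]
  | cons n rest ih =>
    unfold pvCollect
    simp only []
    split
    · -- early exit: all table keys (hence k) are in the enlarged set
      rename_i hall
      rw [List.all_eq_true] at hall
      obtain ⟨kv, hkv, hkeq⟩ : ∃ kv ∈ pvTable, kv.1 = k := by
        obtain ⟨kv, hkv, hkeq⟩ := List.mem_map.mp hk; exact ⟨kv, hkv, hkeq⟩
      have hc := hall kv hkv
      rw [hkeq] at hc
      rw [hc]
      -- RHS: contains of the enlarged set is ≤ the disjunction; show RHS = true
      have hmem := (PySem.Set.contains_iff _ _).mp hc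
      rw [PySem.Set.mem_add] at hmem
      rcases hmem with hmem | hmem
      · simp
        exact Or.inl hmem
      · simp [hmem.symm]
    · rw [ih]
      have hadd : PySem.Set.contains (PySem.Set.add seen (PySem.Dict.get? (PySem.Dict.mk n) "segment_type")) (some k)
          = (PySem.Set.contains seen (some k) || (PySem.Dict.get? (PySem.Dict.mk n) "segment_type" == some k)) := by
        rcases hb : (PySem.Set.contains seen (some k) || (PySem.Dict.get? (PySem.Dict.mk n) "segment_type" == some k)) with _ | _
        · rw [Bool.or_eq_false_iff] at hb
          apply Bool.eq_false_iff.mpr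
          intro hc
          have hm := (PySem.Set.contains_iff _ _).mp hc
          rw [PySem.Set.mem_add] at hm
          rcases hm with hm | hm
          · exact Bool.eq_false_iff.mp hb.1 ((PySem.Set.contains_iff _ _).mpr hm)
          · exact Bool.eq_false_iff.mp hb.2 (by simp [hm])
        · rw [Bool.or_eq_true] at hb
          apply (PySem.Set.contains_iff _ _).mpr
          rw [PySem.Set.mem_add]
          rcases hb with hb | hb
          · exact Or.inl ((PySem.Set.contains_iff _ _).mp hb)
          · exact Or.inr (by simpa [eq_comm] using (beq_iff_eq.mp hb))
      rw [hadd]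
      simp [List.any_cons, Bool.or_assoc]

-- ===== VERDICT =====
theorem generate_learning_objectives_py_spec : Claim_equal_generate_learning_objectives_py := by
  intro nodes _
  unfold Spec_generate_learning_objectives_py generate_learning_objectives_py generate_learning_objectives_py_alt
  simp only [pvTable, List.filterMap_cons, List.filterMap_nil]
  rw [contains_pvCollect nodes PySem.Set.empty "technical_core" (by simp [pvTable]),
      contains_pvCollect nodes PySem.Set.empty "application" (by simp [pvTable]),
      contains_pvCollect nodes PySem.Set.empty "illustrative" (by simp [pvTable])]
  simp [PySem.Set.empty]
  split_ifs <;> simp_all
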